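-- pv_equiv track=rewrite | github.com/EdinburghGenomics/hesiod | make_report.py | resolve_filter
-- ===== SOURCE A (Python) =====
-- def resolve_filter(bcfilter, all_info):
--     """Looks at '_filter_type' (and maybe '_filter_yaml') for each cell to see
--        how 'real' samples are determined.
--        Returns one of ['off', 'all', 'mixed', 'yaml', 'cutoff 0.00'] assuming that the
--        latter two are the only possible values that will be seen in the YAML.
--     """
--     if bcfilter.lower() in ['all', 'off']:
--         # Easy. No filter to add, whatever is in the YAML
--         return bcfilter.lower()
--
--     ftypes = set(filter( None,
--                          [ci.get('_filter_type') for ci in all_info.values()] ))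
--     if not ftypes:
--         # No filtering info is included
--         return 'off'
--     elif len(ftypes) > 1:
--         return 'mixed'
--     else:
--         return ftypes.pop()
-- ===== SOURCE B (Python) =====
-- def resolve_filter(bcfilter, all_info):
--     if bcfilter.lower() in ['all', 'off']:
--         return bcfilter.lower()
--     found = None
--     for ci in all_info.values():
--         ft = ci.get('_filter_type')
--         if ft:
--             if found is None:
--                 found = ft
--             elif ft != found:
--                 return 'mixed'
--     return found if found is not None else 'off'
-- ===== Notes on version B (the rewrite author's own statement) =====
-- stated objective: alternative
-- what changed: Replaces building a set of all distinct truthy filter types and then size-checking it with a single early-exit pass that tracks one representative value and returns 'mixed' as soon as a second distinct type is seen.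
import Mathlib
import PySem

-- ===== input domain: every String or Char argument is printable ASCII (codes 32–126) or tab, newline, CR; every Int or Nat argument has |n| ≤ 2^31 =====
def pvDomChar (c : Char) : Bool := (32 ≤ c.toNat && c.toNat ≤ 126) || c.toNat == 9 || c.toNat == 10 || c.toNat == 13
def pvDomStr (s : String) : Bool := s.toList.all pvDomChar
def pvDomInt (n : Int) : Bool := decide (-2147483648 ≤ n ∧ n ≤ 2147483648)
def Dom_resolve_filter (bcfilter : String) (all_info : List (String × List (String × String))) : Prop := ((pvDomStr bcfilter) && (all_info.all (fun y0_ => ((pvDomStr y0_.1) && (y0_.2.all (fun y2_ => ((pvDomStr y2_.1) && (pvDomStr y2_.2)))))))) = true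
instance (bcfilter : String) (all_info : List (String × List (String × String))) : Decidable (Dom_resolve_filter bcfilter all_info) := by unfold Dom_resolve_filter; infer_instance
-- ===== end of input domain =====

-- B replaces 'collect the set of truthy filter types then test its size' by a single
-- early-exit pass tracking one representative value; same cost, different traversal.

-- ===== PORT A =====
def resolve_filter (bcfilter : String) (all_info : List (String × List (String × String))) : String :=
  if PySem.Str.lower bcfilter = "all" ∨ PySem.Str.lower bcfilter = "off" then
    PySem.Str.lower bcfilter
  else
    -- ftypes = set(filter(None, [ci.get('_filter_type') for ci in all_info.values()]))
    -- filter(None, …) drops None and the empty string (the falsy values of type Optional[str])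
    let ftypes : PySem.Set String :=
      PySem.Set.ofList
        ((all_info.map (fun ci => (PySem.Dict.mk ci.2).get? "_filter_type")).filterMap
          (fun o => match o with
                    | some s => if s = "" then none else some s
                    | none => none))
    if ftypes = [] then "off"
    else if 1 < PySem.Set.len ftypes then "mixed"
    else ftypes.headD ""   -- set.pop() on a singleton set is its unique element

-- ===== PORT B =====
def resolveFilterGo (cells : List (List (String × String))) (found : Option String) : String :=
  match cells with
  | [] => match found with
          | some f => f
          | none => "off"
  | ci :: rest =>
    match (PySem.Dict.mk ci).get? "_filter_type" with
    | some ft =>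
      if ft = "" then resolveFilterGo rest found   -- falsy ft: skipped
      else
        match found with
        | none => resolveFilterGo rest (some ft)
        | some f => if ft ≠ f then "mixed" else resolveFilterGo rest found
    | none => resolveFilterGo rest found

def resolve_filter_alt (bcfilter : String) (all_info : List (String × List (String × String))) : String :=
  if PySem.Str.lower bcfilter = "all" ∨ PySem.Str.lower bcfilter = "off" then
    PySem.Str.lower bcfilter
  else
    resolveFilterGo (all_info.map (·.2)) none

-- ===== PRECONDITION & SPEC =====
def Spec_resolve_filter (bcfilter : String) (all_info : List (String × List (String × String))) (out : String) : Prop := out = resolve_filter_alt bcfilter all_info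
instance (bcfilter : String) (all_info : List (String × List (String × String))) (out : String) : Decidable (Spec_resolve_filter bcfilter all_info out) := by unfold Spec_resolve_filter; infer_instance

-- ===== CLAIM (what is proved, stated in full; the proofs are below) =====
def Claim_equal_resolve_filter : Prop := ∀ (bcfilter : String) (all_info : List (String × List (String × String))), Dom_resolve_filter bcfilter all_info → Spec_resolve_filter bcfilter all_info (resolve_filter bcfilter all_info)

-- ===== LEMMAS AND PROOFS =====

-- the filtered list of truthy filter types
def pvFtypes (cells : List (List (String × String))) : List String :=
  cells.filterMap (fun ci =>
    match (PySem.Dict.mk ci).get? "_filter_type" with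
    | some s => if s = "" then none else some s
    | none => none)

lemma go_some (cells : List (List (String × String))) (f : String) :
    resolveFilterGo cells (some f) =
      if (pvFtypes cells).all (· = f) then f else "mixed" := by
  induction cells with
  | nil => simp [resolveFilterGo, pvFtypes]
  | cons ci rest ih =>
    cases h : (PySem.Dict.mk ci).get? "_filter_type" with
    | none => simp [resolveFilterGo, pvFtypes, h]; simpa [pvFtypes] using ih
    | some s =>
      by_cases hs : s = ""
      · simp [resolveFilterGo, pvFtypes, h, hs]; simpa [pvFtypes] using ih
      · by_cases hf : s = f
        · subst hf
          simp [resolveFilterGo, pvFtypes, h, hs]; simpa [pvFtypes] using ih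
        · simp [resolveFilterGo, pvFtypes, h, hs, hf, List.all_cons]

lemma go_none (cells : List (List (String × String))) :
    resolveFilterGo cells none =
      match pvFtypes cells with
      | [] => "off"
      | x :: rest => if rest.all (· = x) then x else "mixed" := by
  induction cells with
  | nil => simp [resolveFilterGo, pvFtypes]
  | cons ci rest ih =>
    cases h : (PySem.Dict.mk ci).get? "_filter_type" with
    | none => simp [resolveFilterGo, pvFtypes, h]; simpa [pvFtypes] using ih
    | some s =>
      by_cases hs : s = ""
      · simp [resolveFilterGo, pvFtypes, h, hs]; simpa [pvFtypes] using ih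
      · simp [resolveFilterGo, pvFtypes, h, hs]
        simpa [pvFtypes] using go_some rest s

lemma ofList_classify (L : List String) :
    (if PySem.Set.ofList L = [] then "off"
     else if 1 < PySem.Set.len (PySem.Set.ofList L) then "mixed"
     else (PySem.Set.ofList L).headD "") =
      match L with
      | [] => "off"
      | x :: rest => if rest.all (· = x) then x else "mixed" := by
  cases L with
  | nil => simp [PySem.Set.ofList_nil]
  | cons x rest =>
    rw [PySem.Set.ofList_cons]
    by_cases hall : rest.all (· = x)
    · have hd : (PySem.Set.ofList rest).discard x = [] := by
        apply List.eq_nil_iff_forall_not_mem.mpr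
        intro y hy
        have hmem : y ∈ PySem.Set.ofList rest ∧ y ≠ x :=
          (PySem.Set.mem_discard _ _ _).mp hy
        exact hmem.2 (by
          have := (PySem.Set.mem_ofList rest y).mp hmem.1
          simpa using (List.all_eq_true.mp hall) y this)
      simp [hd, hall, PySem.Set.len]
    · obtain ⟨y, hy, hne⟩ : ∃ y ∈ rest, ¬ y = x := by
        simpa using hall
      have hyd : y ∈ (PySem.Set.ofList rest).discard x :=
        (PySem.Set.mem_discard _ _ _).mpr ⟨(PySem.Set.mem_ofList rest y).mpr hy, hne⟩
      have hdne : (PySem.Set.ofList rest).discard x ≠ [] := List.ne_nil_of_mem hyd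
      have hpos : 0 < ((PySem.Set.ofList rest).discard x).length :=
        List.length_pos_of_mem hyd
      have hlen : 1 < PySem.Set.len (x :: (PySem.Set.ofList rest).discard x) := by
        simp [PySem.Set.len]
        omega
      rw [if_neg (by simp), if_pos hlen]
      simp [hall]

-- ===== VERDICT (by name: the statement is the Claim_ definition above) =====
theorem resolve_filter_spec : Claim_equal_resolve_filter := by
  intro bcfilter all_info _
  unfold Spec_resolve_filter resolve_filter resolve_filter_alt
  by_cases hguard : PySem.Str.lower bcfilter = "all" ∨ PySem.Str.lower bcfilter = "off"
  · simp [hguard]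
  · simp only [hguard, if_false]
    rw [go_none, ofList_classify]
    simp only [pvFtypes, List.filterMap_map, Function.comp_def]
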